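-- pv_equiv track=rewrite | github.com/timkatop3/PZ_IS-23 | OGE/oge.py | find_max_sum_pair_divisible_by_t
-- ===== SOURCE A (Python) =====
-- def find_max_sum_pair_divisible_by_t(numbers, t):
--     """
--     Finds the pair of elements with maximum sum divisible by t in the given sequence.
--
--     Args:
--         numbers (list[int]): The sequence of positive integers.
--         t (int): The divisor value.
--
--     Returns:
--         tuple[int, int]: The pair of elements with maximum sum divisible by t, or an empty tuple if no such pair exists.
--     """
--
--     max_sum, max_pair = 0, (-1, -1)
--
--     for i in range(len(numbers)):
--         for j in range(i + 1, len(numbers)):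
--             current_sum = numbers[i] + numbers[j]
--             if current_sum % t == 0 and current_sum > max_sum:
--                 max_sum = current_sum
--                 max_pair = (numbers[i], numbers[j])
--
--     return max_pair
-- ===== SOURCE B (Python) =====
-- def find_max_sum_pair_divisible_by_t(numbers, t):
--     """Residue-class single pass: the maximum sum divisible by t is found by pairing
--     each element with the best earlier element of complementary residue mod t; a second
--     linear scan with a suffix counter recovers the exact pair A's scan order reports."""
--     best_by_res = {}
--     best = 0
--     for y in numbers:
--         r = (-y) % t
--         if r in best_by_res:
--             cand = best_by_res[r] + y
--             if cand > best:
--                 best = cand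
--         ry = y % t
--         if ry not in best_by_res or y > best_by_res[ry]:
--             best_by_res[ry] = y
--     if best == 0:
--         return (-1, -1)
--     later = {}
--     for v in numbers:
--         later[v] = later.get(v, 0) + 1
--     for x in numbers:
--         later[x] -= 1
--         if later.get(best - x, 0) > 0:
--             return (x, best - x)
--     return (-1, -1)  # unreachable: best is attained by some pair
-- ===== Notes on version B (the rewrite author's own statement) =====
-- stated objective: faster
-- what changed: A's O(n^2) all-pairs scan is replaced by one linear pass keeping a dict of per-residue-class prefix maxima (the best divisible sum pairs each element with the largest earlier element of complementary residue mod t), followed by a linear suffix-counter scan that recovers the exact pair A's lexicographic scan reports.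
-- outside the precondition, e.g. on find_max_sum_pair_divisible_by_t([5], 0): A returns (-1, -1), B raises ZeroDivisionError
import Mathlib
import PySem

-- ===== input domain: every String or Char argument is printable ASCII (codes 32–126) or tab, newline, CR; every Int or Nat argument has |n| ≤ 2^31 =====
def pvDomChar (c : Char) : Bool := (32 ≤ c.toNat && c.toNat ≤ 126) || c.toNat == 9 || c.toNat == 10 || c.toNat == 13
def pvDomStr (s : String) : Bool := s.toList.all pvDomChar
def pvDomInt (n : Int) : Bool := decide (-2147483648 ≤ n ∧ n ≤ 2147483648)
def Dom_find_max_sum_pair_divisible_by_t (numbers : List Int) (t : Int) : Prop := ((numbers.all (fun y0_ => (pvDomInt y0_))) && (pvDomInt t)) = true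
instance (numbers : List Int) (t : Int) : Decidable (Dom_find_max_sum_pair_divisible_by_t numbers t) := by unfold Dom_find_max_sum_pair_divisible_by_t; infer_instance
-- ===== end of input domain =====

-- B replaces A's quadratic double loop by a linear residue-class pass (dict of per-residue
-- prefix maxima) plus a linear suffix-counter scan that recovers the same pair; objective: faster.

-- ===== PORT A =====
-- A's nested index loops; range indices are always in range, so pyGetD is exact here
def find_max_sum_pair_divisible_by_t (numbers : List Int) (t : Int) : List Int :=
  let n : Int := (numbers.length : Int)
  let st := (PySem.List.pyRange 0 n 1).foldl (fun (s : Int × Int × Int) i =>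
      (PySem.List.pyRange (i + 1) n 1).foldl (fun (s : Int × Int × Int) j =>
        let current_sum := PySem.List.pyGetD numbers i 0 + PySem.List.pyGetD numbers j 0
        if PySem.Int.mod current_sum t = 0 ∧ current_sum > s.1 then
          (current_sum, PySem.List.pyGetD numbers i 0, PySem.List.pyGetD numbers j 0)
        else s) s)
    ((0 : Int), (-1 : Int), (-1 : Int))
  [st.2.1, st.2.2]

-- ===== PORT B =====
-- one step of B's first loop: try the best earlier partner of complementary residue, then
-- record y as the residue-class maximum if it improves it
def pvStepB (t : Int) (s : PySem.Dict Int Int × Int) (y : Int) : PySem.Dict Int Int × Int :=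
  let r := PySem.Int.mod (-y) t
  let best := if s.1.contains r then
      (let cand := s.1.getD r 0 + y; if cand > s.2 then cand else s.2)
    else s.2
  let ry := PySem.Int.mod y t
  let d := if s.1.contains ry = false ∨ s.1.getD ry 0 < y then s.1.insert ry y else s.1
  (d, best)

-- B's second loop: walk the list keeping `later` = counts of the elements strictly after
-- the current one ('later[x] -= 1' always has its key present, so modify with default 0 is exact)
def pvFindB (best : Int) (later : PySem.Dict Int Int) : List Int → List Int
  | [] => [-1, -1]
  | x :: rest =>
    let later' := later.modify x 0 (· - 1)
    if later'.getD (best - x) 0 > 0 then [x, best - x] else pvFindB best later' rest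

def find_max_sum_pair_divisible_by_t_alt (numbers : List Int) (t : Int) : List Int :=
  let best := (numbers.foldl (pvStepB t) (PySem.Dict.empty, 0)).2
  if best = 0 then [-1, -1]
  else
    let later := numbers.foldl
      (fun (d : PySem.Dict Int Int) v => d.insert v (d.getD v 0 + 1)) PySem.Dict.empty
    pvFindB best later numbers

-- ===== PRECONDITION & SPEC =====
-- Pre_ excludes t = 0: A raises ZeroDivisionError there whenever the list has at least two
-- elements and returns only on degenerate lists of length ≤ 1 (where B raises instead).
def Pre_find_max_sum_pair_divisible_by_t (numbers : List Int) (t : Int) : Prop := t ≠ 0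
instance (numbers : List Int) (t : Int) : Decidable (Pre_find_max_sum_pair_divisible_by_t numbers t) := by unfold Pre_find_max_sum_pair_divisible_by_t; infer_instance
def pvWitness_find_max_sum_pair_divisible_by_t : List Int × Int := ([1, 5, 2, 4], 3)

def Spec_find_max_sum_pair_divisible_by_t (numbers : List Int) (t : Int) (out : List Int) : Prop := out = find_max_sum_pair_divisible_by_t_alt numbers t
instance (numbers : List Int) (t : Int) (out : List Int) : Decidable (Spec_find_max_sum_pair_divisible_by_t numbers t out) := by unfold Spec_find_max_sum_pair_divisible_by_t; infer_instance

-- ===== CLAIM (what is proved, stated in full; the proofs are below) =====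
def Claim_equal_find_max_sum_pair_divisible_by_t : Prop := ∀ (numbers : List Int) (t : Int), Dom_find_max_sum_pair_divisible_by_t numbers t → Pre_find_max_sum_pair_divisible_by_t numbers t → Spec_find_max_sum_pair_divisible_by_t numbers t (find_max_sum_pair_divisible_by_t numbers t)

-- ===== LEMMAS AND PROOFS =====

-- all ordered pairs of the list (earlier element first), in A's scan order
def pvPairs : List Int → List (Int × Int)
  | [] => []
  | x :: rest => rest.map (fun y => (x, y)) ++ pvPairs rest

-- A's loop body as a function of the state and the pair of values
def pvStepA (t : Int) (s : Int × Int × Int) (p : Int × Int) : Int × Int × Int :=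
  if PySem.Int.mod (p.1 + p.2) t = 0 ∧ p.1 + p.2 > s.1 then (p.1 + p.2, p.1, p.2) else s

-- A's running maximum alone
def pvMsum (t m : Int) (ps : List (Int × Int)) : Int :=
  ps.foldl (fun c p => if PySem.Int.mod (p.1 + p.2) t = 0 ∧ p.1 + p.2 > c then p.1 + p.2 else c) m

-- the pair sums divisible by t
def pvDSums (t : Int) (ps : List (Int × Int)) : List Int :=
  (ps.map (fun p => p.1 + p.2)).filter (fun s => PySem.Int.mod s t == 0)

-- invariant of B's dictionary: it holds the maximum of each residue class seen so far
def pvDInv (t : Int) (pre : List Int) (d : PySem.Dict Int Int) : Prop :=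
  ∀ r : Int,
    (d.get? r = none → ∀ w ∈ pre, PySem.Int.mod w t ≠ r) ∧
    (∀ v, d.get? r = some v →
      v ∈ pre ∧ PySem.Int.mod v t = r ∧ ∀ w ∈ pre, PySem.Int.mod w t = r → w ≤ v)

-- ghost recursion: B's second loop seen through the counter invariant
def pvMemFind (best : Int) : List Int → List Int
  | [] => [-1, -1]
  | x :: rest => if best - x ∈ rest then [x, best - x] else pvMemFind best rest

lemma pvModEq_iff_dvd (t : Int) (ht : t ≠ 0) (a b : Int) :
    PySem.Int.mod a t = PySem.Int.mod b t ↔ t ∣ (a - b) := by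
  have ha := PySem.Int.floordiv_mul_add_mod a t
  have hb := PySem.Int.floordiv_mul_add_mod b t
  constructor
  · intro h
    exact ⟨PySem.Int.floordiv a t - PySem.Int.floordiv b t, by rw [Int.mul_sub]; nlinarith⟩
  · rintro ⟨k, hk⟩
    have hdvd : t ∣ (PySem.Int.mod a t - PySem.Int.mod b t) :=
      ⟨k - PySem.Int.floordiv a t + PySem.Int.floordiv b t, by rw [Int.mul_add, Int.mul_sub]; nlinarith⟩
    have hz : PySem.Int.mod a t - PySem.Int.mod b t = 0 := by
      apply Int.eq_zero_of_abs_lt_dvd ((abs_dvd t _).mpr hdvd)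
      rcases lt_or_gt_of_ne ht with hneg | hpos
      · have b1 := PySem.Int.mod_neg_bounds a hneg
        have b2 := PySem.Int.mod_neg_bounds b hneg
        rw [abs_of_neg hneg] at *
        apply abs_lt.2; constructor <;> linarith [b1.1, b1.2, b2.1, b2.2]
      · have b1 := PySem.Int.mod_nonneg a hpos
        have b2 := PySem.Int.mod_nonneg b hpos
        have c1 := PySem.Int.mod_lt a hpos
        have c2 := PySem.Int.mod_lt b hpos
        rw [abs_of_pos hpos]
        apply abs_lt.2; constructor <;> linarith
    linarith

lemma pvMod_add_eq_zero_iff (t : Int) (ht : t ≠ 0) (x y : Int) :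
    PySem.Int.mod (x + y) t = 0 ↔ PySem.Int.mod x t = PySem.Int.mod (-y) t := by
  rw [PySem.Int.mod_eq_zero_iff_dvd, pvModEq_iff_dvd t ht]
  have : x - -y = x + y := by ring
  rw [this]

lemma pvMsum_eq_foldl_max (t : Int) : ∀ (ps : List (Int × Int)) (m : Int),
    pvMsum t m ps = (pvDSums t ps).foldl max m := by
  intro ps
  induction ps with
  | nil => intro m; rfl
  | cons p ps ih =>
    intro m
    simp only [pvMsum, pvDSums, List.foldl_cons, List.map_cons, List.filter_cons] at *
    by_cases hdiv : PySem.Int.mod (p.1 + p.2) t = 0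
    · simp only [hdiv, beq_self_eq_true, if_true, List.foldl_cons]
      by_cases hgt : p.1 + p.2 > m
      · simp only [hdiv, hgt, and_self, if_true]
        rw [ih (p.1 + p.2)]
        congr 1
        omega
      · simp only [hdiv, hgt, and_false, if_false, true_and]
        rw [ih m]
        congr 1
        omega
    · have : (PySem.Int.mod (p.1 + p.2) t == 0) = false := by simp [hdiv]
      simp only [hdiv, false_and, if_false, this]
      exact ih m

lemma pvBmax_eq_max_of_mem_ub (l : List Int) (b M : Int) (hM : M ∈ l)
    (hub : ∀ z ∈ l, z ≤ M) : l.foldl max b = max b M := by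
  have h1 := (PySem.List.le_foldl_max l b).1
  have h2 := (PySem.List.le_foldl_max l b).2 M hM
  have h3 := PySem.List.foldl_max_mem l b
  apply le_antisymm
  · rcases h3 with h | h
    · rw [h]; exact le_max_left _ _
    · exact le_trans (hub _ h) (le_max_right _ _)
  · exact max_le h1 h2

lemma pvMsum_init_le (t : Int) (ps : List (Int × Int)) (m : Int) : m ≤ pvMsum t m ps := by
  rw [pvMsum_eq_foldl_max]
  exact (PySem.List.le_foldl_max _ _).1

lemma pvMsum_cases (t : Int) (ps : List (Int × Int)) (m : Int) :
    pvMsum t m ps = m ∨ (∃ p ∈ ps, p.1 + p.2 = pvMsum t m ps ∧ PySem.Int.mod (pvMsum t m ps) t = 0) := by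
  rw [pvMsum_eq_foldl_max]
  rcases PySem.List.foldl_max_mem (pvDSums t ps) m with h | h
  · exact Or.inl h
  · right
    simp only [pvDSums, List.mem_filter, List.mem_map, beq_iff_eq] at h
    obtain ⟨⟨p, hp, hsum⟩, hdiv⟩ := h
    refine ⟨p, hp, ?_, ?_⟩ <;> simp only [pvDSums] <;> assumption

lemma pvAfold_char (t : Int) : ∀ (ps : List (Int × Int)) (m : Int) (pq : Int × Int),
    ps.foldl (pvStepA t) (m, pq)
      = (pvMsum t m ps,
         if pvMsum t m ps = m then pq
         else (ps.find? (fun p => p.1 + p.2 == pvMsum t m ps)).getD pq) := by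
  intro ps
  induction ps with
  | nil => intro m pq; simp [pvMsum]
  | cons p ps ih =>
    intro m pq
    have hMstep : pvMsum t m (p :: ps)
        = pvMsum t (if PySem.Int.mod (p.1 + p.2) t = 0 ∧ p.1 + p.2 > m then p.1 + p.2 else m) ps := by
      simp [pvMsum]
    by_cases c1 : PySem.Int.mod (p.1 + p.2) t = 0 ∧ p.1 + p.2 > m
    · have hstep : pvStepA t (m, pq) p = (p.1 + p.2, p) := by simp [pvStepA, c1]
      rw [List.foldl_cons, hstep, ih]
      have hM : pvMsum t m (p :: ps) = pvMsum t (p.1 + p.2) ps := by rw [hMstep, if_pos c1]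
      have hle : p.1 + p.2 ≤ pvMsum t (p.1 + p.2) ps := pvMsum_init_le t ps _
      have hMne : pvMsum t m (p :: ps) ≠ m := by rw [hM]; omega
      rw [hM]
      by_cases h2 : pvMsum t (p.1 + p.2) ps = p.1 + p.2
      · have hfind : (p :: ps).find? (fun q => q.1 + q.2 == pvMsum t (p.1 + p.2) ps) = some p := by
          rw [List.find?_cons_of_pos]
          simp [h2]
        rw [if_pos h2, if_neg (by omega), hfind]
        rfl
      · have hlt : p.1 + p.2 < pvMsum t (p.1 + p.2) ps := by omega
        have hsome : ∃ q ∈ ps, q.1 + q.2 = pvMsum t (p.1 + p.2) ps ∧ PySem.Int.mod (pvMsum t (p.1 + p.2) ps) t = 0 := by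
          rcases pvMsum_cases t ps (p.1 + p.2) with h | h
          · omega
          · exact h
        obtain ⟨q, hq, hqsum, _⟩ := hsome
        have hfs : ((ps.find? (fun q => q.1 + q.2 == pvMsum t (p.1 + p.2) ps)).isSome) := by
          rw [List.find?_isSome]
          exact ⟨q, hq, by simp [hqsum]⟩
        obtain ⟨pr, hpr⟩ := Option.isSome_iff_exists.mp hfs
        have hfindcons : (p :: ps).find? (fun q => q.1 + q.2 == pvMsum t (p.1 + p.2) ps)
            = ps.find? (fun q => q.1 + q.2 == pvMsum t (p.1 + p.2) ps) := by
          rw [List.find?_cons_of_neg]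
          simp
          omega
        rw [if_neg h2, if_neg (by omega), hfindcons, hpr]
        simp
    · have hstep : pvStepA t (m, pq) p = (m, pq) := by simp only [pvStepA]; rw [if_neg]; exact c1
      rw [List.foldl_cons, hstep, ih]
      have hM : pvMsum t m (p :: ps) = pvMsum t m ps := by rw [hMstep, if_neg c1]
      rw [hM]
      by_cases h2 : pvMsum t m ps = m
      · simp [h2]
      · have hle : m ≤ pvMsum t m ps := pvMsum_init_le t ps m
        have hdivM : PySem.Int.mod (pvMsum t m ps) t = 0 := by
          rcases pvMsum_cases t ps m with h | h
          · exact absurd h h2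
          · obtain ⟨q, hq, hqs, hqd⟩ := h
            exact hqd
        have hhead : ¬(p.1 + p.2 = pvMsum t m ps) := by
          intro he
          push_neg at c1
          have := c1 (he ▸ hdivM)
          omega
        rw [if_neg h2, if_neg h2, List.find?_cons_of_neg (by simp [hhead])]

lemma pvPairs_append_singleton (y : Int) : ∀ (l : List Int),
    (pvPairs (l ++ [y])).Perm (pvPairs l ++ l.map (fun x => (x, y))) := by
  intro l
  induction l with
  | nil => simp [pvPairs]
  | cons x rest ih =>
    refine List.perm_iff_count.mpr (fun a => ?_)
    have ihc := List.perm_iff_count.mp ih a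
    show (List.map (fun z => (x, z)) (rest ++ [y]) ++ pvPairs (rest ++ [y])).count a = _
    simp only [pvPairs, List.map_append, List.count_append, List.map_cons, List.map_nil,
      List.count_cons, List.count_nil] at *
    omega

lemma pvA_index_free (xs : List Int) (t : Int) : ∀ (fuel k : Nat) (s : Int × Int × Int),
    xs.length - k ≤ fuel → k ≤ xs.length →
    (PySem.List.pyRange (k : Int) (xs.length : Int) 1).foldl (fun s i =>
        (PySem.List.pyRange (i + 1) (xs.length : Int) 1).foldl (fun s j =>
          pvStepA t s (PySem.List.pyGetD xs i 0, PySem.List.pyGetD xs j 0)) s) s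
      = (pvPairs (xs.drop k)).foldl (pvStepA t) s := by
  intro fuel
  induction fuel with
  | zero =>
    intro k s hf hk
    have hk' : k = xs.length := by omega
    subst hk'
    rw [PySem.List.pyRange_one_eq_nil (by omega), List.drop_length]
    rfl
  | succ fuel ih =>
    intro k s hf hk
    by_cases hlt : k < xs.length
    · rw [PySem.List.pyRange_one_cons (by exact_mod_cast hlt), List.foldl_cons]
      have hdrop : xs.drop k = xs[k] :: xs.drop (k + 1) := List.drop_eq_getElem_cons hlt
      have hinner : ∀ (s' : Int × Int × Int),
          (PySem.List.pyRange ((k : Int) + 1) (xs.length : Int) 1).foldl (fun s j =>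
            pvStepA t s (PySem.List.pyGetD xs (k : Int) 0, PySem.List.pyGetD xs j 0)) s'
          = (xs.drop (k + 1)).foldl (fun s y => pvStepA t s (xs[k], y)) s' := by
        intro s'
        have := PySem.List.foldl_pyRange_pyGetD' (xs := xs) (a := (k : Int) + 1) (d := 0)
          (f := fun s y => pvStepA t s (xs[k], y)) (init := s') (by omega)
        rw [show ((k : Int) + 1).toNat = k + 1 by omega] at this
        rw [← this]
        congr 1
        funext s'' j
        have hget : PySem.List.pyGetD xs (k : Int) 0 = xs[k] := by
          rw [PySem.List.pyGetD_natCast]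
          exact List.getD_eq_getElem xs 0 hlt
        rw [hget]
      rw [hinner s]
      have hmap : (xs.drop (k+1)).foldl (fun s y => pvStepA t s (xs[k], y)) s
           = ((xs.drop (k+1)).map (fun y => (xs[k], y))).foldl (pvStepA t) s := by
        rw [List.foldl_map]
      rw [hmap, hdrop]
      show _ = List.foldl (pvStepA t) s
        ((xs.drop (k+1)).map (fun y => (xs[k], y)) ++ pvPairs (xs.drop (k+1)))
      rw [List.foldl_append]
      have := ih (k+1) (((xs.drop (k+1)).map (fun y => (xs[k], y))).foldl (pvStepA t) s)
        (by omega) (by omega)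
      push_cast at this ⊢
      exact this
    · have hk' : k = xs.length := by omega
      subst hk'
      rw [PySem.List.pyRange_one_eq_nil (by omega), List.drop_length]
      rfl

lemma pvStepB_best (t : Int) (ht : t ≠ 0) (pre : List Int) (d : PySem.Dict Int Int)
    (best y : Int) (hinv : pvDInv t pre d)
    (hbest : best = (pvDSums t (pvPairs pre)).foldl max 0) :
    (pvStepB t (d, best) y).2 = (pvDSums t (pvPairs (pre ++ [y]))).foldl max 0 := by
  have hperm : (pvDSums t (pvPairs (pre ++ [y]))).Perm
      (pvDSums t (pvPairs pre) ++ pvDSums t (pre.map (fun x => (x, y)))) := by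
    have := (pvPairs_append_singleton y pre).map (fun p => p.1 + p.2)
    have h2 := this.filter (fun s => PySem.Int.mod s t == 0)
    simpa [pvDSums, List.filter_append] using h2
  rw [hperm.foldl_eq 0, List.foldl_append, ← hbest]
  -- now: step result = foldl max best (new sums)
  have hnew : pvDSums t (pre.map (fun x => (x, y))) =
      (pre.map (fun x => x + y)).filter (fun s => PySem.Int.mod s t == 0) := by
    simp [pvDSums, List.map_map]
    rfl
  rw [hnew]
  simp only [pvStepB]
  rcases hget : d.get? (PySem.Int.mod (-y) t) with _ | v
  · -- no partner: new sums empty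
    have hcont : d.contains (PySem.Int.mod (-y) t) = false := by
      rw [PySem.Dict.contains_eq_isSome_get?, hget]; rfl
    have hnil : (pre.map (fun x => x + y)).filter (fun s => PySem.Int.mod s t == 0) = [] := by
      rw [List.filter_eq_nil_iff]
      intro z hz
      simp only [List.mem_map] at hz
      obtain ⟨x, hx, rfl⟩ := hz
      simp only [beq_iff_eq]
      intro hdiv
      exact ((hinv (PySem.Int.mod (-y) t)).1 hget x hx) ((pvMod_add_eq_zero_iff t ht x y).mp hdiv)
    rw [hnil]
    simp [hcont]
  · have hcont : d.contains (PySem.Int.mod (-y) t) = true := by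
      rw [PySem.Dict.contains_eq_isSome_get?, hget]; rfl
    obtain ⟨hvmem, hvres, hvmax⟩ := (hinv (PySem.Int.mod (-y) t)).2 v hget
    have hgetD : d.getD (PySem.Int.mod (-y) t) 0 = v := PySem.Dict.getD_of_get?_eq_some d 0 hget
    have hmem : v + y ∈ (pre.map (fun x => x + y)).filter (fun s => PySem.Int.mod s t == 0) := by
      simp only [List.mem_filter, List.mem_map, beq_iff_eq]
      exact ⟨⟨v, hvmem, rfl⟩, (pvMod_add_eq_zero_iff t ht v y).mpr hvres⟩
    have hub : ∀ z ∈ (pre.map (fun x => x + y)).filter (fun s => PySem.Int.mod s t == 0), z ≤ v + y := by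
      intro z hz
      simp only [List.mem_filter, List.mem_map, beq_iff_eq] at hz
      obtain ⟨⟨x, hx, rfl⟩, hdiv⟩ := hz
      have := hvmax x hx ((pvMod_add_eq_zero_iff t ht x y).mp hdiv)
      omega
    rw [pvBmax_eq_max_of_mem_ub _ best (v + y) hmem hub]
    simp only [hcont, if_true, hgetD]
    rcases le_or_gt (v + y) best with h | h
    · rw [if_neg (by omega)]
      omega
    · rw [if_pos (by omega)]
      omega

lemma pvStepB_dinv (t : Int) (pre : List Int) (d : PySem.Dict Int Int)
    (best y : Int) (hinv : pvDInv t pre d) :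
    pvDInv t (pre ++ [y]) (pvStepB t (d, best) y).1 := by
  intro r'
  simp only [pvStepB]
  by_cases hcase : d.contains (PySem.Int.mod y t) = false ∨ d.getD (PySem.Int.mod y t) 0 < y
  · rw [if_pos hcase]
    by_cases hr : r' = PySem.Int.mod y t
    · subst hr
      constructor
      · intro hnone
        rw [PySem.Dict.get?_insert] at hnone
        simp at hnone
      · intro v hv
        rw [PySem.Dict.get?_insert, if_pos rfl] at hv
        obtain rfl : y = v := by injection hv
        refine ⟨by simp, rfl, ?_⟩
        intro w hw hwres
        rcases List.mem_append.mp hw with hw | hw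
        · -- w in pre with residue (mod y t): dict must have had it
          rcases hget : d.get? (PySem.Int.mod y t) with _ | v0
          · exact absurd hwres ((hinv _).1 hget w hw)
          · have hcontT : d.contains (PySem.Int.mod y t) = true := by
              rw [PySem.Dict.contains_eq_isSome_get?, hget]; rfl
            have hgetD : d.getD (PySem.Int.mod y t) 0 = v0 := PySem.Dict.getD_of_get?_eq_some d 0 hget
            have hlt : v0 < y := by
              rcases hcase with hc | hc
              · rw [hcontT] at hc; cases hc
              · omega
            have := ((hinv _).2 v0 hget).2.2 w hw hwres
            omega
        · simp only [List.mem_singleton] at hw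
          omega
    · constructor
      · intro hnone
        rw [PySem.Dict.get?_insert, if_neg hr] at hnone
        intro w hw
        rcases List.mem_append.mp hw with hw | hw
        · exact (hinv r').1 hnone w hw
        · simp only [List.mem_singleton] at hw
          subst hw
          exact fun h => hr h.symm
      · intro v hv
        rw [PySem.Dict.get?_insert, if_neg hr] at hv
        obtain ⟨h1, h2, h3⟩ := (hinv r').2 v hv
        refine ⟨List.mem_append.mpr (Or.inl h1), h2, ?_⟩
        intro w hw hwres
        rcases List.mem_append.mp hw with hw | hw
        · exact h3 w hw hwres
        · simp only [List.mem_singleton] at hw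
          subst hw
          exact absurd hwres.symm hr
  · rw [if_neg hcase]
    push_neg at hcase
    obtain ⟨hcont, hge⟩ := hcase
    have hcontT : d.contains (PySem.Int.mod y t) = true := by
      cases h : d.contains (PySem.Int.mod y t)
      · exact absurd h hcont
      · rfl
    rcases hget : d.get? (PySem.Int.mod y t) with _ | v0
    · rw [PySem.Dict.contains_eq_isSome_get?, hget] at hcontT; cases hcontT
    · have hgetD : d.getD (PySem.Int.mod y t) 0 = v0 := PySem.Dict.getD_of_get?_eq_some d 0 hget
      by_cases hr : r' = PySem.Int.mod y t
      · subst hr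
        constructor
        · intro hnone
          rw [hnone] at hget; cases hget
        · intro v hv
          rw [hget] at hv
          obtain rfl : v0 = v := by injection hv
          obtain ⟨h1, h2, h3⟩ := (hinv _).2 v0 hget
          refine ⟨List.mem_append.mpr (Or.inl h1), h2, ?_⟩
          intro w hw hwres
          rcases List.mem_append.mp hw with hw | hw
          · exact h3 w hw hwres
          · simp only [List.mem_singleton] at hw
            subst hw
            omega
      · constructor
        · intro hnone
          intro w hw
          rcases List.mem_append.mp hw with hw | hw
          · exact (hinv r').1 hnone w hw
          · simp only [List.mem_singleton] at hw
            subst hw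
            exact fun h => hr h.symm
        · intro v hv
          obtain ⟨h1, h2, h3⟩ := (hinv r').2 v hv
          refine ⟨List.mem_append.mpr (Or.inl h1), h2, ?_⟩
          intro w hw hwres
          rcases List.mem_append.mp hw with hw | hw
          · exact h3 w hw hwres
          · simp only [List.mem_singleton] at hw
            subst hw
            exact absurd hwres.symm hr

lemma pvPhase1 (t : Int) (ht : t ≠ 0) : ∀ (l pre : List Int) (d : PySem.Dict Int Int) (best : Int),
    pvDInv t pre d → best = (pvDSums t (pvPairs pre)).foldl max 0 →
    pvDInv t (pre ++ l) (l.foldl (pvStepB t) (d, best)).1 ∧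
    (l.foldl (pvStepB t) (d, best)).2 = (pvDSums t (pvPairs (pre ++ l))).foldl max 0 := by
  intro l
  induction l with
  | nil =>
    intro pre d best h1 h2
    simpa using ⟨h1, h2⟩
  | cons y rest ih =>
    intro pre d best h1 h2
    rw [List.foldl_cons]
    have hstep1 := pvStepB_dinv t pre d best y h1
    have hstep2 := pvStepB_best t ht pre d best y h1 h2
    have hsb : pvStepB t (d, best) y = ((pvStepB t (d, best) y).1, (pvStepB t (d, best) y).2) := rfl
    rw [hsb]
    have := ih (pre ++ [y]) (pvStepB t (d, best) y).1 (pvStepB t (d, best) y).2 hstep1 hstep2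
    simpa using this

lemma pvFindB_eq_memFind (best : Int) : ∀ (l : List Int) (d : PySem.Dict Int Int),
    (∀ v : Int, d.getD v 0 = (l.count v : Int)) → pvFindB best d l = pvMemFind best l := by
  intro l
  induction l with
  | nil => intro d h; rfl
  | cons x rest ih =>
    intro d h
    have hd' : ∀ v : Int, (d.modify x 0 (· - 1)).getD v 0 = (rest.count v : Int) := by
      intro v
      rw [PySem.Dict.getD_modify]
      by_cases hv : v = x
      · subst hv
        rw [if_pos rfl, h v, List.count_cons_self]
        push_cast
        omega
      · rw [if_neg hv, h v, List.count_cons_of_ne (fun he => hv he.symm)]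
    show (if (d.modify x 0 (· - 1)).getD (best - x) 0 > 0 then _ else pvFindB best (d.modify x 0 (· - 1)) rest) = _
    rw [hd' (best - x)]
    by_cases hmem : best - x ∈ rest
    · rw [if_pos (by exact_mod_cast List.count_pos_iff.mpr hmem)]
      simp [pvMemFind, hmem]
    · have hc0 : rest.count (best - x) = 0 := List.count_eq_zero.mpr hmem
      rw [if_neg (by rw [hc0]; simp)]
      rw [ih _ hd']
      simp [pvMemFind, hmem]

lemma pvMemFind_of_find? (best : Int) : ∀ (xs : List Int) (pr : Int × Int),
    (pvPairs xs).find? (fun p => p.1 + p.2 == best) = some pr →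
    pvMemFind best xs = [pr.1, pr.2] := by
  intro xs
  induction xs with
  | nil => intro pr h; cases h
  | cons x rest ih =>
    intro pr h
    rw [show pvPairs (x :: rest) = rest.map (fun y => (x, y)) ++ pvPairs rest from rfl,
      List.find?_append] at h
    by_cases hmem : best - x ∈ rest
    · have hfirst : (rest.map (fun y => (x, y))).find? (fun p => p.1 + p.2 == best)
          = some (x, best - x) := by
        rw [List.find?_map]
        have hs : ((rest.find? ((fun p : Int × Int => p.1 + p.2 == best) ∘ (fun y => (x, y)))).isSome) := by
          rw [List.find?_isSome]
          exact ⟨best - x, hmem, by simp⟩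
        obtain ⟨y0, hy0⟩ := Option.isSome_iff_exists.mp hs
        have := List.find?_some hy0
        simp only [Function.comp_apply, beq_iff_eq] at this
        rw [hy0]
        simp
        omega
      rw [hfirst] at h
      obtain rfl : (x, best - x) = pr := by
        have : (some (x, best - x)).or ((pvPairs rest).find? (fun p => p.1 + p.2 == best)) = some (x, best - x) := rfl
        rw [this] at h
        injection h
      simp [pvMemFind, hmem]
    · have hnone : (rest.map (fun y => (x, y))).find? (fun p => p.1 + p.2 == best) = none := by
        rw [List.find?_eq_none]
        intro p hp
        simp only [List.mem_map] at hp
        obtain ⟨y, hy, rfl⟩ := hp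
        simp only [beq_iff_eq]
        intro hsum
        have : best - x = y := by omega
        exact hmem (this ▸ hy)
      rw [hnone, Option.none_or] at h
      rw [show pvMemFind best (x :: rest) = if best - x ∈ rest then [x, best - x] else pvMemFind best rest from rfl,
        if_neg hmem]
      exact ih pr h

lemma pvA_eq_pairs (xs : List Int) (t : Int) :
    find_max_sum_pair_divisible_by_t xs t
      = (let st := (pvPairs xs).foldl (pvStepA t) ((0 : Int), (-1 : Int), (-1 : Int));
         [st.2.1, st.2.2]) := by
  have hidx := pvA_index_free xs t xs.length 0 ((0 : Int), (-1 : Int), (-1 : Int))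
    (by omega) (by omega)
  simp only [List.drop_zero, Nat.cast_zero] at hidx
  exact congrArg (fun st : Int × Int × Int => [st.2.1, st.2.2]) hidx

-- ===== VERDICT (by name: the statement is the Claim_ definition above) =====
theorem find_max_sum_pair_divisible_by_t_spec : Claim_equal_find_max_sum_pair_divisible_by_t := by
  intro numbers t _hdom ht
  unfold Spec_find_max_sum_pair_divisible_by_t
  have ht' : t ≠ 0 := ht
  -- A's side: the final state over the value pairs
  rw [pvA_eq_pairs numbers t]
  rw [pvAfold_char t (pvPairs numbers) 0 ((-1 : Int), (-1 : Int))]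
  -- B's side: the first loop computes the same maximum
  have hinv0 : pvDInv t [] PySem.Dict.empty := by
    intro r
    constructor
    · intro _ w hw; cases hw
    · intro v hv; rw [PySem.Dict.get?_empty] at hv; cases hv
  have hphase1 := pvPhase1 t ht' numbers [] PySem.Dict.empty 0 hinv0 (by rfl)
  have hbest : (numbers.foldl (pvStepB t) (PySem.Dict.empty, 0)).2
      = pvMsum t 0 (pvPairs numbers) := by
    rw [hphase1.2, pvMsum_eq_foldl_max]
    rfl
  unfold find_max_sum_pair_divisible_by_t_alt
  rw [hbest]
  by_cases hS : pvMsum t 0 (pvPairs numbers) = 0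
  · simp [hS]
  · rw [if_neg hS, if_neg hS]
    -- counter invariant for the second loop
    have hcnt : ∀ v : Int,
        (numbers.foldl (fun (d : PySem.Dict Int Int) v => d.insert v (d.getD v 0 + 1))
          PySem.Dict.empty).getD v 0 = (numbers.count v : Int) := by
      intro v
      rw [PySem.Dict.getD_foldl_insert_add_one, PySem.Dict.getD_empty]
      omega
    rw [pvFindB_eq_memFind _ numbers _ hcnt]
    -- the maximum is attained, so find? succeeds and both sides return that pair
    have hex : ∃ p ∈ pvPairs numbers, p.1 + p.2 = pvMsum t 0 (pvPairs numbers) ∧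
        PySem.Int.mod (pvMsum t 0 (pvPairs numbers)) t = 0 := by
      rcases pvMsum_cases t (pvPairs numbers) 0 with h | h
      · exact absurd h hS
      · exact h
    obtain ⟨q, hq, hqsum, _⟩ := hex
    have hfs : ((pvPairs numbers).find?
        (fun p => p.1 + p.2 == pvMsum t 0 (pvPairs numbers))).isSome := by
      rw [List.find?_isSome]
      exact ⟨q, hq, by simp [hqsum]⟩
    obtain ⟨pr, hpr⟩ := Option.isSome_iff_exists.mp hfs
    rw [hpr, pvMemFind_of_find? _ numbers pr hpr]
    simp
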